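-- pv_equiv track=rewrite | github.com/mt1516/Advent-of-Code-2023 | Day 1/task2.py | sum_of_numbers_alphabet
-- ===== SOURCE A (Python) =====
-- def sum_of_numbers_alphabet(input):
--     # Sum of all the numbers
--     sum = 0
--     # Dictionary for replacing words with numbers
--     # Keep the beginning and the end of the word to avoid replacing common letters
--     digit_map = {"one": "o1e", "two": "t2o", "three": "t3e", "four": "f4r", "five": "f5e",
--                 "six": "s6x", "seven": "s7n", "eight": "e8t", "nine": "n9e"}
--
--     for i in input:
--         # check if the line is empty
--         if not i:
--             continue
--
--         # replace words with numbers
--         for key, value in digit_map.items():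
--             i = i.replace(key, value)
--
--         # find the first number
--         for j in i:
--             if j.isdigit():
--                 first_number = j
--                 break
--         # find the second number
--         for j in reversed(i):
--             if j.isdigit():
--                 second_number = j
--                 break
--
--         # check if second number exist
--         if not second_number:
--             second_number = first_number
--
--         number = int(first_number + second_number)
--         sum += number
--
--     return sum
-- ===== SOURCE B (Python) =====
-- # One left-to-right scan per line collecting digit characters (literal digits or
-- # spelled digit words checked in place), instead of nine str.replace passes.
-- WORDS = [("one", "1"), ("two", "2"), ("three", "3"), ("four", "4"), ("five", "5"),
--          ("six", "6"), ("seven", "7"), ("eight", "8"), ("nine", "9")]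
--
-- def sum_of_numbers_alphabet(input):
--     total = 0
--     for line in input:
--         if not line:
--             continue
--         digits = []
--         for i in range(len(line)):
--             ch = line[i]
--             if ch.isdigit():
--                 digits.append(ch)
--             else:
--                 for word, d in WORDS:
--                     if line.startswith(word, i):
--                         digits.append(d)
--                         break
--         total += int(digits[0] + digits[-1])
--     return total
-- ===== Notes on version B (the rewrite author's own statement) =====
-- stated objective: simpler
-- what changed: Instead of rebuilding each line nine times with str.replace on a padded-replacement dict and then searching the rebuilt string for digits, B makes a single left-to-right scan of the original line, collecting a digit at each position that holds a digit character or starts one of the nine spelled words, and sums int(first+last). Pre_ excludes inputs in which some non-empty line contains neither a digit character nor a spelled digit word: there A either raises NameError (first such line) or accidentally reuses first_number/second_number left over from a previous line, while B raises IndexError.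
-- outside the precondition, e.g. on sum_of_numbers_alphabet(['12', 'abc']): A returns 24, B raises IndexError; on sum_of_numbers_alphabet(['abc']): A raises NameError, B raises IndexError
import Mathlib
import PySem

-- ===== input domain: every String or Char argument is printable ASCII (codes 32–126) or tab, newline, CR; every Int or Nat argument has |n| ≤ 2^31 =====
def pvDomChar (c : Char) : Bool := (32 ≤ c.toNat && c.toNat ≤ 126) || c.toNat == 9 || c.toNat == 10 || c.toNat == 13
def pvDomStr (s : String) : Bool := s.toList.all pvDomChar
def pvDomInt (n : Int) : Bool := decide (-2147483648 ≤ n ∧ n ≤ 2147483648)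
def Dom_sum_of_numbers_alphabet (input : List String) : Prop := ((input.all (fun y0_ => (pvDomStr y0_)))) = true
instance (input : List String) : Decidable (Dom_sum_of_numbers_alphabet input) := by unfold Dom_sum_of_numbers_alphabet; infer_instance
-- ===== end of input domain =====

-- B replaces A's nine str.replace passes by a single left-to-right scan of each line that collects
-- digit characters (literal digits, or one of the nine spelled words starting at the position);
-- objective: simpler (one pass over the line instead of nine rebuilds of it).

-- ===== PORT A =====
def pvDigitMap : PySem.Dict String String :=
  PySem.Dict.ofList [("one", "o1e"), ("two", "t2o"), ("three", "t3e"), ("four", "f4r"),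
    ("five", "f5e"), ("six", "s6x"), ("seven", "s7n"), ("eight", "e8t"), ("nine", "n9e")]

-- `for j in …: if j.isdigit(): x = j; break` — v is the variable's previous binding (none = still unbound)
def pvFindDigit : List Char → Option Char → Option Char
  | [], v => v
  | c :: t, v => if PySem.Chars.isdigit c then some c else pvFindDigit t v

def pvStepA (st : Int × Option Char × Option Char) (i : String) : Int × Option Char × Option Char :=
  if i = "" then st
  else
    let i := pvDigitMap.items.foldl (fun s kv => PySem.Str.replace s kv.1 kv.2) i
    let first_number := pvFindDigit i.toList st.2.1
    let second_number := pvFindDigit i.toList.reverse st.2.2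
    -- `if not second_number:` — a bound second_number is a nonempty (hence truthy) string;
    -- none models the still-unbound variable (a NameError in Python, excluded by Pre_)
    let second_number := match second_number with | none => first_number | some b => some b
    -- int(first_number + second_number); the `| _, _` row is the unbound case excluded by Pre_
    let number : Int := match first_number, second_number with
      | some a, some b => (PySem.Int.ofStr? (String.ofList [a, b])).getD 0
      | _, _ => 0
    (st.1 + number, first_number, second_number)

def sum_of_numbers_alphabet (input : List String) : Int :=
  (input.foldl pvStepA (0, none, none)).1

-- ===== PORT B =====
def pvWords : List (List Char × Char) :=
  [(['o','n','e'], '1'), (['t','w','o'], '2'), (['t','h','r','e','e'], '3'),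
   (['f','o','u','r'], '4'), (['f','i','v','e'], '5'), (['s','i','x'], '6'),
   (['s','e','v','e','n'], '7'), (['e','i','g','h','t'], '8'), (['n','i','n','e'], '9')]

-- the index loop `for i in range(len(line))` with `line.startswith(word, i)`, as a walk over the suffixes
def pvScan : List Char → List Char
  | [] => []
  | c :: t =>
    (if PySem.Chars.isdigit c then [c]
     else
       match pvWords.find? (fun p => p.1.isPrefixOf (c :: t)) with
       | some p => [p.2]
       | none => []) ++ pvScan t

def pvStepB (total : Int) (line : String) : Int :=
  if line = "" then total
  else
    let ds := pvScan line.toList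
    -- int(digits[0] + digits[-1]); pyGet? = none is Python's IndexError on a digit-less line,
    -- which Pre_ excludes
    match PySem.List.pyGet? ds 0, PySem.List.pyGet? ds (-1) with
    | some a, some b => total + (PySem.Int.ofStr? (String.ofList [a, b])).getD 0
    | _, _ => total

def sum_of_numbers_alphabet_alt (input : List String) : Int :=
  input.foldl pvStepB 0

-- ===== PRECONDITION & SPEC =====
def pvLineOK (l : String) : Bool :=
  l == "" || l.toList.any PySem.Chars.isdigit ||
    (["one", "two", "three", "four", "five", "six", "seven", "eight", "nine"].any
      fun w => PySem.Str.isIn w l)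

-- Pre_ excludes inputs in which some non-empty line contains neither a digit character nor a
-- spelled digit word: there A either raises NameError (first such line) or accidentally reuses
-- first_number/second_number left over from a previous line (leftover loop state), while B
-- raises IndexError.
def Pre_sum_of_numbers_alphabet (input : List String) : Prop :=
  (input.all pvLineOK) = true
instance (input : List String) : Decidable (Pre_sum_of_numbers_alphabet input) := by
  unfold Pre_sum_of_numbers_alphabet; infer_instance

def pvWitness_sum_of_numbers_alphabet : List String := ["one2", "", "4xyz"]

def Spec_sum_of_numbers_alphabet (input : List String) (out : Int) : Prop :=
  out = sum_of_numbers_alphabet_alt input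
instance (input : List String) (out : Int) : Decidable (Spec_sum_of_numbers_alphabet input out) := by
  unfold Spec_sum_of_numbers_alphabet; infer_instance

-- ===== CLAIM (what is proved, stated in full; the proofs are below) =====
def Claim_equal_sum_of_numbers_alphabet : Prop :=
  ∀ (input : List String), Dom_sum_of_numbers_alphabet input →
    Pre_sum_of_numbers_alphabet input →
    Spec_sum_of_numbers_alphabet input (sum_of_numbers_alphabet input)

-- ===== LEMMAS AND PROOFS =====

def replSpec (o : Char) (os new : List Char) : List Char → List Char
  | [] => []
  | c :: t =>
    if (o :: os).isPrefixOf (c :: t) then new ++ replSpec o os new (t.drop os.length)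
    else c :: replSpec o os new t
termination_by s => s.length
decreasing_by
  · simp only [List.length_cons, List.length_drop]; omega
  · simp

lemma replace_go_eq (o : Char) (os new : List Char) :
    ∀ fuel l acc, l.length ≤ fuel →
      PySem.Chars.replace.go (o :: os) new fuel l acc = acc.reverse ++ replSpec o os new l := by
  intro fuel
  induction fuel with
  | zero =>
    intro l acc h
    have : l = [] := List.length_eq_zero_iff.mp (Nat.le_zero.mp h)
    subst this
    simp [PySem.Chars.replace.go, replSpec]
  | succ fuel ih =>
    intro l acc h
    match l with
    | [] => simp [PySem.Chars.replace.go, replSpec]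
    | c :: t =>
      rw [PySem.Chars.replace.go]
      by_cases hp : (o :: os).isPrefixOf (c :: t)
      · rw [if_pos hp]
        rw [ih ((c :: t).drop (o :: os).length) (new.reverse ++ acc)
          (by simp only [List.length_drop]; simp at h ⊢; omega)]
        rw [replSpec, if_pos hp]
        simp [List.drop_succ_cons]
      · rw [if_neg hp]
        rw [ih t (c :: acc) (by simp at h ⊢; omega)]
        rw [replSpec, if_neg hp]
        simp

lemma chars_replace_eq (o : Char) (os new : List Char) (s : List Char) :
    PySem.Chars.replace s (o :: os) new = replSpec o os new s := by
  rw [PySem.Chars.replace]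
  simp only [List.isEmpty_cons, if_false, Bool.false_eq_true]
  exact (replace_go_eq o os new s.length s [] le_rfl).trans (by simp)

lemma match_pull (o z d : Char) (os : List Char) (hd : PySem.Chars.isdigit d = true) :
    ∀ n (s v : List Char), s.length ≤ n → (∀ c ∈ v, PySem.Chars.isdigit c = false) →
      v <+: replSpec o os [o, d, z] s → v <+: s := by
  intro n
  induction n with
  | zero =>
    intro s v hs hv h
    have : s = [] := List.length_eq_zero_iff.mp (Nat.le_zero.mp hs)
    subst this
    rw [replSpec] at h
    exact h
  | succ n ih =>
    intro s v hs hv h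
    match s with
    | [] => rw [replSpec] at h; exact h
    | c :: t =>
      rw [replSpec] at h
      by_cases hp : (o :: os).isPrefixOf (c :: t)
      · rw [if_pos hp] at h
        have hco : c = o := by
          have := List.isPrefixOf_iff_prefix.mp hp
          obtain ⟨r, hr⟩ := this
          simpa using congrArg List.head? hr.symm
        match v with
        | [] => exact List.nil_prefix
        | [x] =>
          obtain ⟨r, hr⟩ := h
          simp at hr
          obtain ⟨rfl, -⟩ := hr
          subst hco
          exact ⟨t, rfl⟩
        | x :: y :: v' =>
          obtain ⟨r, hr⟩ := h
          simp at hr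
          obtain ⟨rfl, rfl, -⟩ := hr
          have := hv y (by simp)
          rw [hd] at this
          exact absurd this (by simp)
      · rw [if_neg hp] at h
        match v with
        | [] => exact List.nil_prefix
        | x :: v' =>
          obtain ⟨r, hr⟩ := h
          simp at hr
          obtain ⟨rfl, hr⟩ := hr
          have := ih t v' (by simp at hs; omega) (fun c hc => hv c (by simp [hc])) ⟨r, hr⟩
          exact (List.prefix_cons_inj x).mpr this

lemma take2_of_prefix {u x : List Char} (h : u <+: x) (h2 : 2 ≤ u.length) :
    x.take 2 = u.take 2 := by
  obtain ⟨r, rfl⟩ := h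
  rw [List.take_append_of_le_length h2]

lemma match_push (o z d : Char) (os u : List Char)
    (htake : (o :: os).take 2 ≠ u.take 2)
    (hint : ∀ k, k < u.length → 1 ≤ k → k + 2 ≤ u.length → (o :: os).take 2 ≠ (u.drop k).take 2)
    (hlen : 1 ≤ os.length) :
    ∀ (s : List Char) (j : Nat), j ≤ u.length → u.drop j <+: s →
      u.drop j <+: replSpec o os [o, d, z] s := by
  intro s
  induction s with
  | nil =>
    intro j hj h
    have : u.drop j = [] := List.prefix_nil.mp h
    rw [this, replSpec]
  | cons c t iht =>
    intro j hj h
    rw [replSpec]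
    by_cases hp : (o :: os).isPrefixOf (c :: t)
    · rw [if_pos hp]
      have hwpre : (o :: os) <+: (c :: t) := List.isPrefixOf_iff_prefix.mp hp
      rcases hm : u.drop j with _ | ⟨x, _ | ⟨y, m'⟩⟩
      · exact List.nil_prefix
      · -- singleton: its char is the head c = o
        rw [hm] at h
        obtain ⟨r, hr⟩ := h
        simp at hr
        obtain ⟨rfl, -⟩ := hr
        have hco : o = x := by
          obtain ⟨r2, hr2⟩ := hwpre
          simpa using congrArg List.head? hr2
        subst hco
        exact ⟨d :: z :: replSpec o os [o, d, z] (t.drop os.length), rfl⟩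
      · -- length ≥ 2: take-2 clash with the word
        exfalso
        have h2 : 2 ≤ (u.drop j).length := by rw [hm]; simp
        have hw2 : 2 ≤ (o :: os).length := by simp; omega
        rw [hm] at h
        have e1 : (c :: t).take 2 = (x :: y :: m').take 2 := take2_of_prefix h (by simp)
        have e2 : (c :: t).take 2 = (o :: os).take 2 := take2_of_prefix hwpre hw2
        rw [← hm] at e1
        have : (o :: os).take 2 = (u.drop j).take 2 := e2.symm.trans e1
        rcases Nat.eq_zero_or_pos j with rfl | hj1
        · exact htake (by simpa using this)
        · have hlen2 : j + 2 ≤ u.length := by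
            have := List.length_drop (l := u) (i := j) ▸ h2
            omega
          exact hint j (by omega) hj1 hlen2 this
    · rw [if_neg hp]
      rcases hm : u.drop j with _ | ⟨x, m⟩
      · exact List.nil_prefix
      · rw [hm] at h
        obtain ⟨r, hr⟩ := h
        simp at hr
        obtain ⟨rfl, hr⟩ := hr
        have hjlt : j < u.length := by
          by_contra hge
          rw [List.drop_eq_nil_of_le (by omega)] at hm
          exact absurd hm (by simp)
        have hm2 : u.drop (j+1) = m := by
          have : (u.drop j).tail = u.drop (j+1) := List.tail_drop
          rw [hm] at this
          simpa using this.symm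
        have := iht (j+1) (by omega) (hm2 ▸ ⟨r, hr⟩)
        rw [hm2] at this
        exact (List.prefix_cons_inj x).mpr this

def scanAux (ws : List (List Char × Char)) : List Char → List Char
  | [] => []
  | c :: t =>
    (if PySem.Chars.isdigit c then [c]
     else
       match ws.find? (fun p => p.1.isPrefixOf (c :: t)) with
       | some p => [p.2]
       | none => []) ++ scanAux ws t

lemma scan_peel (T : List (List Char × Char)) (w t : List Char)
    (hnd : ∀ c ∈ w, PySem.Chars.isdigit c = false)
    (hT : ∀ u ∈ T, 2 ≤ u.1.length)
    (hint : ∀ u ∈ T, ∀ k, k < w.length → 1 ≤ k → k + 2 ≤ w.length → u.1.take 2 ≠ (w.drop k).take 2) :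
    ∀ (m j : Nat), j + m = w.length - 1 → 1 ≤ j →
      scanAux T (w.drop j ++ t) = scanAux T (w.drop (w.length - 1) ++ t) := by
  intro m
  induction m with
  | zero =>
    intro j hj h1
    have : j = w.length - 1 := by omega
    rw [this]
  | succ m ih =>
    intro j hj h1
    have hjlt : j < w.length := by omega
    have hj2 : j + 2 ≤ w.length := by omega
    have hdropc : w.drop j = w[j] :: w.drop (j + 1) := List.drop_eq_getElem_cons hjlt
    rw [hdropc, List.cons_append, scanAux]
    have hdig : PySem.Chars.isdigit w[j] = false := hnd _ (List.getElem_mem hjlt)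
    rw [hdig]
    have hfind : (T.find? fun p => p.1.isPrefixOf (w[j] :: (w.drop (j + 1) ++ t))) = none := by
      rw [List.find?_eq_none]
      intro u hu hpre
      have hpre' : u.1 <+: (w.drop j ++ t) := by
        rw [hdropc, List.cons_append]
        exact List.isPrefixOf_iff_prefix.mp hpre
      have h2 : 2 ≤ u.1.length := hT u hu
      have e1 : (w.drop j ++ t).take 2 = u.1.take 2 := take2_of_prefix hpre' h2
      have e2 : (w.drop j ++ t).take 2 = (w.drop j).take 2 :=
        List.take_append_of_le_length (by simp [List.length_drop]; omega)
      exact hint u hu j hjlt h1 hj2 (e1.symm.trans e2)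
    rw [hfind]
    simp only [Bool.false_eq_true, if_false, List.nil_append]
    exact ih (j + 1) (by omega) (by omega)

lemma find?_eq_of {α : Type} (p q : α → Bool) :
    ∀ (l : List α) (u : α), l.find? q = some u → p u = true →
      (∀ v ∈ l, p v = true → q v = true) → l.find? p = some u := by
  intro l
  induction l with
  | nil => intro u h; simp at h
  | cons x xs ih =>
    intro u h hp hvq
    rcases hq : q x with _ | _
    · rw [List.find?_cons, hq] at h
      have hpx : p x = false := by
        rcases hpx : p x with _ | _
        · rfl
        · exact absurd (hvq x (by simp) hpx) (by simp [hq])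
      rw [List.find?_cons, hpx]
      exact ih u h hp fun v hv => hvq v (by simp [hv])
    · rw [List.find?_cons, hq] at h
      obtain rfl : x = u := by simpa using h
      rw [List.find?_cons, hp]

lemma find?_none_of {α : Type} (p q : α → Bool) :
    ∀ l : List α, (∀ v ∈ l, p v = true → q v = true) → l.find? q = none →
      l.find? p = none := by
  intro l h hq
  rw [List.find?_eq_none] at hq ⊢
  intro x hx hpx
  exact hq x hx (h x hx hpx)

lemma main_step (o z d : Char) (mid : List Char) (T' : List (List Char × Char))
    (hnd : ∀ c ∈ (o :: (mid ++ [z])), PySem.Chars.isdigit c = false)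
    (hd : PySem.Chars.isdigit d = true)
    (hoz : o ≠ z)
    (hT' : ∀ u ∈ T', (∀ c ∈ u.1, PySem.Chars.isdigit c = false) ∧ 3 ≤ u.1.length)
    (hdis : ∀ u ∈ T', u.1.take 2 ≠ (o :: (mid ++ [z])).take 2)
    (hintW : ∀ u ∈ ((o :: (mid ++ [z]), d) :: T'), ∀ k, k < (o :: (mid ++ [z])).length → 1 ≤ k →
      k + 2 ≤ (o :: (mid ++ [z])).length → u.1.take 2 ≠ ((o :: (mid ++ [z])).drop k).take 2)
    (hintU : ∀ u ∈ T', ∀ k, k < u.1.length → 1 ≤ k → k + 2 ≤ u.1.length →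
      (o :: (mid ++ [z])).take 2 ≠ (u.1.drop k).take 2) :
    ∀ n (s : List Char), s.length ≤ n →
      scanAux T' (replSpec o (mid ++ [z]) [o, d, z] s) = scanAux ((o :: (mid ++ [z]), d) :: T') s := by
  intro n
  induction n with
  | zero =>
    intro s hs
    have : s = [] := List.length_eq_zero_iff.mp (Nat.le_zero.mp hs)
    subst this
    rw [replSpec]; rfl
  | succ n ih =>
    intro s hs
    match s with
    | [] => rw [replSpec]; rfl
    | c :: t =>
      rw [replSpec]
      by_cases hp : (o :: (mid ++ [z])).isPrefixOf (c :: t)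
      · rw [if_pos hp]
        obtain ⟨t₂, ht₂⟩ := List.isPrefixOf_iff_prefix.mp hp
        have hco : o = c := by simpa using congrArg List.head? ht₂
        subst hco
        have ht : t = (mid ++ [z]) ++ t₂ := by simpa using ht₂.symm
        have hdrop : t.drop (mid ++ [z]).length = t₂ := by rw [ht, List.drop_left]
        rw [hdrop]
        have hlenw : (o :: (mid ++ [z])).length = mid.length + 2 := by simp
        have hndo : PySem.Chars.isdigit o = false := hnd o (by simp)
        have hfindL : (T'.find? fun p =>
            p.1.isPrefixOf (o :: d :: z :: replSpec o (mid ++ [z]) [o, d, z] t₂)) = none := by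
          rw [List.find?_eq_none]
          intro u hu hpre
          obtain ⟨hdig, hlen3⟩ := hT' u hu
          have hpre' := List.isPrefixOf_iff_prefix.mp hpre
          match hu1 : u.1 with
          | [] => rw [hu1] at hlen3; simp at hlen3
          | [x] => rw [hu1] at hlen3; simp at hlen3
          | x :: y :: u' =>
            rw [hu1] at hpre'
            obtain ⟨r, hr⟩ := hpre'
            simp at hr
            obtain ⟨-, h2, -⟩ := hr
            have := hdig y (by rw [hu1]; simp)
            rw [h2, hd] at this; exact absurd this (by simp)
        have hzrepl : z :: replSpec o (mid ++ [z]) [o, d, z] t₂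
            = replSpec o (mid ++ [z]) [o, d, z] (z :: t₂) := by
          rw [replSpec]
          have hnotpre : ¬ ((o :: (mid ++ [z])).isPrefixOf (z :: t₂)) = true := by
            intro hcon
            obtain ⟨r, hr⟩ := List.isPrefixOf_iff_prefix.mp hcon
            exact hoz (by simpa using congrArg List.head? hr)
          rw [if_neg hnotpre]
        have hIH : scanAux T' (replSpec o (mid ++ [z]) [o, d, z] (z :: t₂))
            = scanAux ((o :: (mid ++ [z]), d) :: T') (z :: t₂) := by
          apply ih
          have : t.length = mid.length + 1 + t₂.length := by
            rw [ht]; simp; omega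
          simp at hs ⊢
          omega
        have hfindR : (((o :: (mid ++ [z]), d) :: T').find? fun p =>
            p.1.isPrefixOf (o :: t)) = some (o :: (mid ++ [z]), d) :=
          List.find?_cons_of_pos hp
        have hpeel := scan_peel ((o :: (mid ++ [z]), d) :: T') (o :: (mid ++ [z])) t₂
          hnd
          (by
            intro u hu
            rcases List.mem_cons.mp hu with hu | hu
            · subst hu; simp
            · have := (hT' u hu).2; omega)
          hintW mid.length 1 (by omega) (by omega)
        have hdroplast : (o :: (mid ++ [z])).drop ((o :: (mid ++ [z])).length - 1) = [z] := by
          rw [hlenw]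
          show (mid ++ [z]).drop (mid.length) = [z]
          exact List.drop_left
        have key : scanAux T' (o :: d :: z :: replSpec o (mid ++ [z]) [o, d, z] t₂)
            = [d] ++ scanAux ((o :: (mid ++ [z]), d) :: T') (z :: t₂) := by
          conv_lhs => rw [scanAux]
          rw [hndo, hfindL]
          conv_lhs => rw [scanAux]
          rw [hd, hzrepl, hIH]
          simp
        have rhs_eq : scanAux ((o :: (mid ++ [z]), d) :: T') (o :: t)
            = [d] ++ scanAux ((o :: (mid ++ [z]), d) :: T') (z :: t₂) := by
          conv_lhs => rw [scanAux]
          rw [hndo, hfindR, ht]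
          rw [show (mid ++ [z] ++ t₂ : List Char) = (o :: (mid ++ [z])).drop 1 ++ t₂ from rfl]
          rw [hpeel, hdroplast]
          simp
        have e0 : ([o, d, z] : List Char) ++ replSpec o (mid ++ [z]) [o, d, z] t₂
            = o :: d :: z :: replSpec o (mid ++ [z]) [o, d, z] t₂ := rfl
        rw [e0, key, rhs_eq]
      · rw [if_neg hp]
        have hpull : ∀ v ∈ T', (v.1.isPrefixOf (c :: replSpec o (mid ++ [z]) [o, d, z] t)) = true →
            (v.1.isPrefixOf (c :: t)) = true := by
          intro v hv hpre
          have h1 : c :: replSpec o (mid ++ [z]) [o, d, z] t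
              = replSpec o (mid ++ [z]) [o, d, z] (c :: t) := by
            rw [replSpec, if_neg hp]
          rw [h1] at hpre
          exact List.isPrefixOf_iff_prefix.mpr
            (match_pull o z d (mid ++ [z]) hd (c :: t).length (c :: t) v.1 le_rfl
              (hT' v hv).1 (List.isPrefixOf_iff_prefix.mp hpre))
        have htail := ih t (by simp at hs; omega)
        conv_lhs => rw [scanAux]
        conv_rhs => rw [scanAux]
        rw [htail]
        congr 1
        by_cases hc : PySem.Chars.isdigit c = true
        · simp [hc]
        · rw [Bool.of_not_eq_true hc]
          have hR : (List.find? (fun p => p.1.isPrefixOf (c :: t)) ((o :: (mid ++ [z]), d) :: T'))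
              = List.find? (fun p => p.1.isPrefixOf (c :: t)) T' := by
            rw [List.find?_cons, Bool.of_not_eq_true hp]
          rw [hR]
          rcases hq : List.find? (fun p => p.1.isPrefixOf (c :: t)) T' with _ | u
          · rw [hq, find?_none_of _ _ T' hpull hq]
          · have hu : u ∈ T' := List.mem_of_find?_eq_some hq
            have hqq : (u.1.isPrefixOf (c :: t)) = true := by
              have := List.find?_some hq; simpa using this
            have hupre : u.1 <+: (c :: t) := List.isPrefixOf_iff_prefix.mp hqq
            have hlen3 := (hT' u hu).2
            rcases hu1 : u.1 with _ | ⟨x, u'⟩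
            · rw [hu1] at hlen3; simp at hlen3
            · have hxc : x = c := by
                rw [hu1] at hupre
                obtain ⟨r, hr⟩ := hupre
                simpa using congrArg List.head? hr
              have hu' : u' <+: t := by
                rw [hu1] at hupre
                obtain ⟨r, hr⟩ := hupre
                obtain ⟨-, h2⟩ : x = c ∧ u' ++ r = t := by simpa using hr
                exact ⟨r, h2⟩
              have hdrop1 : u.1.drop 1 = u' := by rw [hu1]; rfl
              have hpush := match_push o z d (mid ++ [z]) u.1
                (fun h => hdis u hu h.symm)
                (hintU u hu)
                (by simp)
                t 1 (by omega) (by rw [hdrop1]; exact hu')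
              rw [hdrop1] at hpush
              have hpu : (u.1.isPrefixOf (c :: replSpec o (mid ++ [z]) [o, d, z] t)) = true := by
                apply List.isPrefixOf_iff_prefix.mpr
                rw [hu1, hxc]
                exact (List.prefix_cons_inj c).mpr hpush
              rw [hq, find?_eq_of _ _ T' u hq hpu hpull]

lemma inst_one (s : List Char) :
    scanAux (pvWords.drop 1) (replSpec 'o' (['n'] ++ ['e']) ['o', '1', 'e'] s)
      = scanAux (pvWords.drop 0) s :=
  main_step 'o' 'e' '1' ['n'] (pvWords.drop 1)
    (by intro c hc; fin_cases hc <;> rfl) rfl (by decide)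
    (by intro u hu; fin_cases hu <;> exact ⟨by intro c hc; fin_cases hc <;> rfl, by simp⟩)
    (by decide) (by decide) (by decide) s.length s le_rfl

lemma inst_two (s : List Char) :
    scanAux (pvWords.drop 2) (replSpec 't' (['w'] ++ ['o']) ['t', '2', 'o'] s)
      = scanAux (pvWords.drop 1) s :=
  main_step 't' 'o' '2' ['w'] (pvWords.drop 2)
    (by intro c hc; fin_cases hc <;> rfl) rfl (by decide)
    (by intro u hu; fin_cases hu <;> exact ⟨by intro c hc; fin_cases hc <;> rfl, by simp⟩)
    (by decide) (by decide) (by decide) s.length s le_rfl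

lemma inst_three (s : List Char) :
    scanAux (pvWords.drop 3) (replSpec 't' (['h','r','e'] ++ ['e']) ['t', '3', 'e'] s)
      = scanAux (pvWords.drop 2) s :=
  main_step 't' 'e' '3' ['h','r','e'] (pvWords.drop 3)
    (by intro c hc; fin_cases hc <;> rfl) rfl (by decide)
    (by intro u hu; fin_cases hu <;> exact ⟨by intro c hc; fin_cases hc <;> rfl, by simp⟩)
    (by decide) (by decide) (by decide) s.length s le_rfl

lemma inst_four (s : List Char) :
    scanAux (pvWords.drop 4) (replSpec 'f' (['o','u'] ++ ['r']) ['f', '4', 'r'] s)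
      = scanAux (pvWords.drop 3) s :=
  main_step 'f' 'r' '4' ['o','u'] (pvWords.drop 4)
    (by intro c hc; fin_cases hc <;> rfl) rfl (by decide)
    (by intro u hu; fin_cases hu <;> exact ⟨by intro c hc; fin_cases hc <;> rfl, by simp⟩)
    (by decide) (by decide) (by decide) s.length s le_rfl

lemma inst_five (s : List Char) :
    scanAux (pvWords.drop 5) (replSpec 'f' (['i','v'] ++ ['e']) ['f', '5', 'e'] s)
      = scanAux (pvWords.drop 4) s :=
  main_step 'f' 'e' '5' ['i','v'] (pvWords.drop 5)
    (by intro c hc; fin_cases hc <;> rfl) rfl (by decide)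
    (by intro u hu; fin_cases hu <;> exact ⟨by intro c hc; fin_cases hc <;> rfl, by simp⟩)
    (by decide) (by decide) (by decide) s.length s le_rfl

lemma inst_six (s : List Char) :
    scanAux (pvWords.drop 6) (replSpec 's' (['i'] ++ ['x']) ['s', '6', 'x'] s)
      = scanAux (pvWords.drop 5) s :=
  main_step 's' 'x' '6' ['i'] (pvWords.drop 6)
    (by intro c hc; fin_cases hc <;> rfl) rfl (by decide)
    (by intro u hu; fin_cases hu <;> exact ⟨by intro c hc; fin_cases hc <;> rfl, by simp⟩)
    (by decide) (by decide) (by decide) s.length s le_rfl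

lemma inst_seven (s : List Char) :
    scanAux (pvWords.drop 7) (replSpec 's' (['e','v','e'] ++ ['n']) ['s', '7', 'n'] s)
      = scanAux (pvWords.drop 6) s :=
  main_step 's' 'n' '7' ['e','v','e'] (pvWords.drop 7)
    (by intro c hc; fin_cases hc <;> rfl) rfl (by decide)
    (by intro u hu; fin_cases hu <;> exact ⟨by intro c hc; fin_cases hc <;> rfl, by simp⟩)
    (by decide) (by decide) (by decide) s.length s le_rfl

lemma inst_eight (s : List Char) :
    scanAux (pvWords.drop 8) (replSpec 'e' (['i','g','h'] ++ ['t']) ['e', '8', 't'] s)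
      = scanAux (pvWords.drop 7) s :=
  main_step 'e' 't' '8' ['i','g','h'] (pvWords.drop 8)
    (by intro c hc; fin_cases hc <;> rfl) rfl (by decide)
    (by intro u hu; fin_cases hu <;> exact ⟨by intro c hc; fin_cases hc <;> rfl, by simp⟩)
    (by decide) (by decide) (by decide) s.length s le_rfl

lemma inst_nine (s : List Char) :
    scanAux (pvWords.drop 9) (replSpec 'n' (['i','n'] ++ ['e']) ['n', '9', 'e'] s)
      = scanAux (pvWords.drop 8) s :=
  main_step 'n' 'e' '9' ['i','n'] (pvWords.drop 9)
    (by intro c hc; fin_cases hc <;> rfl) rfl (by decide)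
    (by intro u hu; simp [pvWords] at hu)
    (by decide) (by decide) (by decide) s.length s le_rfl

lemma pvScan_eq (l : List Char) : pvScan l = scanAux pvWords l := by
  induction l with
  | nil => rfl
  | cons c t ih => simp [pvScan, scanAux, ih]

lemma scanAux_nil (l : List Char) : scanAux [] l = l.filter PySem.Chars.isdigit := by
  induction l with
  | nil => rfl
  | cons c t ih => simp [scanAux, ih, List.filter_cons]; split <;> simp

lemma key_line (i : String) :
    ((pvDigitMap.items.foldl (fun s kv => PySem.Str.replace s kv.1 kv.2) i).toList).filter
        PySem.Chars.isdigit = pvScan i.toList := by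
  have hitems : pvDigitMap.items = [("one", "o1e"), ("two", "t2o"), ("three", "t3e"),
      ("four", "f4r"), ("five", "f5e"), ("six", "s6x"), ("seven", "s7n"), ("eight", "e8t"),
      ("nine", "n9e")] := rfl
  rw [hitems]
  simp only [List.foldl_cons, List.foldl_nil]
  simp only [PySem.Str.toList_replace]
  rw [show ("one" : String).toList = ['o','n','e'] from rfl,
      show ("o1e" : String).toList = ['o','1','e'] from rfl,
      show ("two" : String).toList = ['t','w','o'] from rfl,
      show ("t2o" : String).toList = ['t','2','o'] from rfl,
      show ("three" : String).toList = ['t','h','r','e','e'] from rfl,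
      show ("t3e" : String).toList = ['t','3','e'] from rfl,
      show ("four" : String).toList = ['f','o','u','r'] from rfl,
      show ("f4r" : String).toList = ['f','4','r'] from rfl,
      show ("five" : String).toList = ['f','i','v','e'] from rfl,
      show ("f5e" : String).toList = ['f','5','e'] from rfl,
      show ("six" : String).toList = ['s','i','x'] from rfl,
      show ("s6x" : String).toList = ['s','6','x'] from rfl,
      show ("seven" : String).toList = ['s','e','v','e','n'] from rfl,
      show ("s7n" : String).toList = ['s','7','n'] from rfl,
      show ("eight" : String).toList = ['e','i','g','h','t'] from rfl,
      show ("e8t" : String).toList = ['e','8','t'] from rfl,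
      show ("nine" : String).toList = ['n','i','n','e'] from rfl,
      show ("n9e" : String).toList = ['n','9','e'] from rfl]
  rw [chars_replace_eq 'o' ['n','e'] ['o','1','e'],
      chars_replace_eq 't' ['w','o'] ['t','2','o'],
      chars_replace_eq 't' ['h','r','e','e'] ['t','3','e'],
      chars_replace_eq 'f' ['o','u','r'] ['f','4','r'],
      chars_replace_eq 'f' ['i','v','e'] ['f','5','e'],
      chars_replace_eq 's' ['i','x'] ['s','6','x'],
      chars_replace_eq 's' ['e','v','e','n'] ['s','7','n'],
      chars_replace_eq 'e' ['i','g','h','t'] ['e','8','t'],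
      chars_replace_eq 'n' ['i','n','e'] ['n','9','e']]
  exact (scanAux_nil _).symm.trans <| (inst_nine _).trans <| (inst_eight _).trans <|
    (inst_seven _).trans <| (inst_six _).trans <| (inst_five _).trans <| (inst_four _).trans <|
    (inst_three _).trans <| (inst_two _).trans <| (inst_one _).trans (pvScan_eq _).symm

lemma pvFindDigit_eq (l : List Char) (v : Option Char) :
    pvFindDigit l v = match (l.filter PySem.Chars.isdigit).head? with
      | some c => some c
      | none => v := by
  induction l with
  | nil => rfl
  | cons c t ih =>
    by_cases h : PySem.Chars.isdigit c = true
    · simp [pvFindDigit, h]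
    · simp only [Bool.not_eq_true] at h
      simp [pvFindDigit, h, ih]

lemma scan_any_digit : ∀ s : List Char, s.any PySem.Chars.isdigit = true → pvScan s ≠ [] := by
  intro s
  induction s with
  | nil => simp
  | cons c t ih =>
    intro h
    rw [pvScan]
    simp only [List.any_cons, Bool.or_eq_true] at h
    rcases h with h | h
    · rw [h]; simp
    · have := ih h
      simp [this]

lemma scan_infix_word : ∀ (s : List Char) (u : List Char × Char),
    u ∈ pvWords → u.1 <:+: s → pvScan s ≠ [] := by
  intro s
  induction s with
  | nil =>
    intro u hu hinf
    have h1 : u.1 = [] := List.infix_nil.mp hinf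
    have : u.1 ≠ [] := by fin_cases hu <;> simp
    exact absurd h1 this
  | cons c t ih =>
    intro u hu hinf
    rw [pvScan]
    rcases List.infix_cons_iff.mp hinf with hpre | hinf'
    · -- a word starts here: the position contributes a digit (from c or from find?)
      by_cases hc : PySem.Chars.isdigit c = true
      · rw [hc]; simp
      · rw [Bool.of_not_eq_true hc]
        have hsome : (pvWords.find? (fun p => p.1.isPrefixOf (c :: t))).isSome := by
          rw [List.find?_isSome]
          exact ⟨u, hu, List.isPrefixOf_iff_prefix.mpr hpre⟩
        rcases hq : pvWords.find? (fun p => p.1.isPrefixOf (c :: t)) with _ | p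
        · rw [hq] at hsome; simp at hsome
        · simp [hq]
    · have := ih u hu hinf'
      simp [this]

lemma scan_ne_of_ok (l : String) (hok : pvLineOK l = true) (hne : ¬ l = "") :
    pvScan l.toList ≠ [] := by
  unfold pvLineOK at hok
  simp only [Bool.or_eq_true, beq_iff_eq, List.any_eq_true] at hok
  rcases hok with (hl | hd) | hw
  · exact absurd hl hne
  · exact scan_any_digit l.toList (by rw [List.any_eq_true]; exact hd)
  · obtain ⟨w, hwmem, hwin⟩ := hw
    have hinf : w.toList <:+: l.toList := (PySem.Str.isIn_iff_infix _ _).mp hwin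
    fin_cases hwmem
    · exact scan_infix_word l.toList (['o','n','e'], '1') (by decide) hinf
    · exact scan_infix_word l.toList (['t','w','o'], '2') (by decide) hinf
    · exact scan_infix_word l.toList (['t','h','r','e','e'], '3') (by decide) hinf
    · exact scan_infix_word l.toList (['f','o','u','r'], '4') (by decide) hinf
    · exact scan_infix_word l.toList (['f','i','v','e'], '5') (by decide) hinf
    · exact scan_infix_word l.toList (['s','i','x'], '6') (by decide) hinf
    · exact scan_infix_word l.toList (['s','e','v','e','n'], '7') (by decide) hinf
    · exact scan_infix_word l.toList (['e','i','g','h','t'], '8') (by decide) hinf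
    · exact scan_infix_word l.toList (['n','i','n','e'], '9') (by decide) hinf

lemma step_eq (l : String) (hok : pvLineOK l = true)
    (st : Int × Option Char × Option Char) (acc : Int) (h : st.1 = acc) :
    (pvStepA st l).1 = pvStepB acc l := by
  by_cases hl : l = ""
  · simp [pvStepA, pvStepB, hl, h]
  · have hne := scan_ne_of_ok l hok hl
    have hk := key_line l
    have hfd1 : pvFindDigit
        (pvDigitMap.items.foldl (fun s kv => PySem.Str.replace s kv.1 kv.2) l).toList st.2.1
        = match (pvScan l.toList).head? with
          | some c => some c
          | none => st.2.1 := by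
      rw [pvFindDigit_eq, hk]
    have hfd2 : pvFindDigit
        (pvDigitMap.items.foldl (fun s kv => PySem.Str.replace s kv.1 kv.2) l).toList.reverse st.2.2
        = match (pvScan l.toList).getLast? with
          | some c => some c
          | none => st.2.2 := by
      rw [pvFindDigit_eq, List.filter_reverse, hk, List.head?_reverse]
    simp only [pvStepA, pvStepB, if_neg hl]
    rcases hds : pvScan l.toList with _ | ⟨x, xs⟩
    · exact absurd hds hne
    · rw [hds] at hfd1 hfd2
      have hlast : ∃ y, (x :: xs).getLast? = some y := by
        rcases hy : (x :: xs).getLast? with _ | y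
        · simp at hy
        · exact ⟨y, rfl⟩
      obtain ⟨y, hy⟩ := hlast
      rw [hy] at hfd2
      simp only [List.head?_cons] at hfd1
      simp only [hfd1, hfd2]
      rw [PySem.List.pyGet?_zero_cons, PySem.List.pyGet?_neg_one, hy]
      simp [h]

lemma fold_eq : ∀ (input : List String) (st : Int × Option Char × Option Char) (acc : Int),
    st.1 = acc → (∀ l ∈ input, pvLineOK l = true) →
    (input.foldl pvStepA st).1 = input.foldl pvStepB acc := by
  intro input
  induction input with
  | nil => intro st acc h _; simpa using h
  | cons l rest ih =>
    intro st acc h hall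
    simp only [List.foldl_cons]
    exact ih (pvStepA st l) (pvStepB acc l)
      (step_eq l (hall l (by simp)) st acc h)
      (fun x hx => hall x (by simp [hx]))

-- ===== VERDICT (by name: the statement is the Claim_ definition above) =====
theorem sum_of_numbers_alphabet_spec : Claim_equal_sum_of_numbers_alphabet := by
  intro input _ hpre
  unfold Spec_sum_of_numbers_alphabet sum_of_numbers_alphabet sum_of_numbers_alphabet_alt
  exact fold_eq input (0, none, none) 0 rfl
    (by
      unfold Pre_sum_of_numbers_alphabet at hpre
      rw [List.all_eq_true] at hpre
      exact hpre)
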